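-- pv_equiv track=rewrite | github.com/Lighting-Ari/BooTdotDEV | Python/Training/T3/main.py | build_seat_map
-- ===== SOURCE A (Python) =====
-- def build_seat_map(row_labels, seats_per_row, blocked_seats):
--     available_seat = ""
--     seat = 0
--     count = 0
--
--
--     for row in row_labels:
--         count += 1
--         for seat in range(1,seats_per_row +1):
--             temp_seat = row + str(seat)
--             if temp_seat in blocked_seats:
--                 available_seat += "X"
--             else :
--                 available_seat +=  temp_seat
--             if seat < seats_per_row:
--                 available_seat += " "
--
--         if count < len(row_labels):
--             available_seat += "\n"
--
--     return available_seat
-- ===== SOURCE B (Python) =====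
-- def build_seat_map(row_labels, seats_per_row, blocked_seats):
--     # Inverted strategy: generate the full grid unconditionally, then decode each
--     # blocked seat (row prefix + canonical seat number) and mark that cell "X";
--     # join assembles the separators.
--     grid = [[row + str(n) for n in range(1, seats_per_row + 1)] for row in row_labels]
--     seat_no = {str(n): n - 1 for n in range(1, seats_per_row + 1)}
--     for b in blocked_seats:
--         for i, row in enumerate(row_labels):
--             if b.startswith(row):
--                 j = seat_no.get(b[len(row):])
--                 if j is not None:
--                     grid[i][j] = "X"
--     return "\n".join(" ".join(tokens) for tokens in grid)
-- ===== Notes on version B (the rewrite author's own statement) =====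
-- stated objective: alternative
-- what changed: Inverts the control flow: instead of testing every generated seat token against blocked_seats, B generates the grid unconditionally, then decodes each blocked seat (row-label prefix plus a seat-number dict lookup) to its cell and marks it X, and assembles separators with join.
import Mathlib
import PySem

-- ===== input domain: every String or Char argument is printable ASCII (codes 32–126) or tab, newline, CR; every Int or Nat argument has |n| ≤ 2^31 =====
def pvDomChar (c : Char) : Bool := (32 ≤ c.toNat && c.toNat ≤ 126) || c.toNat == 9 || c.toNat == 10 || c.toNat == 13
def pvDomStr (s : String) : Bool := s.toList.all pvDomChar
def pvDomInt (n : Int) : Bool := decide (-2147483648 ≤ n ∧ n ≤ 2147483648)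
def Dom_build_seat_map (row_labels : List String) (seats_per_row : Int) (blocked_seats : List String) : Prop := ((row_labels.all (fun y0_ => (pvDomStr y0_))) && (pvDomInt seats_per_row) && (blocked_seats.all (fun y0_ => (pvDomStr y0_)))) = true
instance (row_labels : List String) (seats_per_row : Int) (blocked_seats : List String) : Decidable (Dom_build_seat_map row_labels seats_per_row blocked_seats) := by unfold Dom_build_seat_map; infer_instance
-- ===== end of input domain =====

-- B inverts A's per-seat scan of blocked_seats: it generates the grid unconditionally, decodes each
-- blocked seat (row prefix + seat-number lookup) to its cell and marks it "X", then joins (objective: alternative).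

-- ===== PORT A =====
-- A's accumulator string is kept as a List Char (PySem's string representation); `str(seat)` is PySem.Int.toChars.
def build_seat_map (row_labels : List String) (seats_per_row : Int) (blocked_seats : List String) : String :=
  String.ofList
    ((row_labels.foldl
      (fun (st : List Char × Int) (row : String) =>
        let count := st.2 + 1
        let afterRow :=
          (PySem.List.pyRange 1 (seats_per_row + 1) 1).foldl
            (fun (acc : List Char) (seat : Int) =>
              let temp_seat := row.toList ++ PySem.Int.toChars seat
              let acc := acc ++ (if temp_seat ∈ blocked_seats.map String.toList then ['X'] else temp_seat)
              if seat < seats_per_row then acc ++ [' '] else acc)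
            st.1
        (if count < (row_labels.length : Int) then afterRow ++ ['\n'] else afterRow, count))
      ([], 0)).1)

-- ===== PORT B =====
-- grid[i][j] = "X"  (i from enumerate, j = seat_no value n-1 ≥ 0, so .toNat on j is exact; List.set is Python's in-range assignment)
def pvSetCell (g : List (List (List Char))) (i j : Nat) (v : List Char) : List (List (List Char)) :=
  g.set i ((g.getD i []).set j v)

def build_seat_map_alt (row_labels : List String) (seats_per_row : Int) (blocked_seats : List String) : String :=
  -- grid = [[row + str(n) for n in range(1, seats_per_row+1)] for row in row_labels]
  let grid0 := row_labels.map (fun row =>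
    (PySem.List.pyRange 1 (seats_per_row + 1) 1).map (fun n => row.toList ++ PySem.Int.toChars n))
  -- seat_no = {str(n): n - 1 for n in range(1, seats_per_row+1)}
  let seatNo : PySem.Dict (List Char) Int :=
    (PySem.List.pyRange 1 (seats_per_row + 1) 1).foldl
      (fun d n => d.insert (PySem.Int.toChars n) (n - 1)) PySem.Dict.empty
  -- for b in blocked_seats: for i, row in enumerate(row_labels):
  --   if b.startswith(row): j = seat_no.get(b[len(row):]); if j is not None: grid[i][j] = "X"
  -- (enumerate ported via List.zipIdx: (element, index) pairs; b[len(row):] is List.drop, exact for this nonneg start)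
  let marked := (blocked_seats.map String.toList).foldl
    (fun g b => (row_labels.map String.toList).zipIdx.foldl
      (fun g p =>
        if PySem.Chars.startswith b p.1 then
          match seatNo.get? (b.drop p.1.length) with
          | some j => pvSetCell g p.2 j.toNat ['X']
          | none => g
        else g) g) grid0
  -- "\n".join(" ".join(tokens) for tokens in grid)
  String.ofList (PySem.Chars.join ['\n'] (marked.map (PySem.Chars.join [' '])))

-- ===== PRECONDITION & SPEC =====
def Spec_build_seat_map (row_labels : List String) (seats_per_row : Int) (blocked_seats : List String) (out : String) : Prop := out = build_seat_map_alt row_labels seats_per_row blocked_seats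
instance (row_labels : List String) (seats_per_row : Int) (blocked_seats : List String) (out : String) : Decidable (Spec_build_seat_map row_labels seats_per_row blocked_seats out) := by unfold Spec_build_seat_map; infer_instance

-- ===== CLAIM (what is proved, stated in full; the proofs are below) =====
def Claim_equal_build_seat_map : Prop := ∀ (row_labels : List String) (seats_per_row : Int) (blocked_seats : List String), Dom_build_seat_map row_labels seats_per_row blocked_seats → Spec_build_seat_map row_labels seats_per_row blocked_seats (build_seat_map row_labels seats_per_row blocked_seats)

-- ===== LEMMAS AND PROOFS =====

-- the cell (i, j) of a 2-dimensional list, as an Option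
def pvCell (g : List (List (List Char))) (i j : Nat) : Option (List Char) :=
  g[i]?.bind (fun r => r[j]?)

lemma pvCell_setCell (g : List (List (List Char))) (a b : Nat) (v : List Char) (i j : Nat) :
    pvCell (pvSetCell g a b v) i j =
      if i = a ∧ j = b ∧ (pvCell g a b).isSome then some v else pvCell g i j := by
  unfold pvCell pvSetCell
  by_cases ha : a < g.length
  · have hgd : g.getD a [] = g[a] := by simp [List.getD, List.getElem?_eq_getElem ha]
    rw [hgd, List.getElem?_set]
    by_cases hia : a = i
    · subst hia
      rw [if_pos rfl, if_pos ha, List.getElem?_eq_getElem ha]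
      simp only [Option.bind_some]
      rw [List.getElem?_set]
      by_cases hjb : b = j
      · subst hjb
        by_cases hb : b < g[a].length
        · rw [if_pos rfl, if_pos hb]
          simp [hb]
        · rw [if_pos rfl, if_neg hb]
          simp [hb]
      · rw [if_neg hjb, if_neg (by rintro ⟨-, h2, -⟩; exact hjb h2.symm)]
    · rw [if_neg hia, if_neg (fun h => hia h.1.symm)]
  · rw [List.set_eq_of_length_le (by omega)]
    have hnone : g[a]? = none := List.getElem?_eq_none (by omega)
    rw [if_neg (by rintro ⟨-, -, h3⟩; rw [hnone] at h3; simp at h3)]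

lemma pvCell_setCell_isSome (g : List (List (List Char))) (a b : Nat) (v : List Char) (i j : Nat) :
    (pvCell (pvSetCell g a b v) i j).isSome = (pvCell g i j).isSome := by
  rw [pvCell_setCell]
  split_ifs with h
  · obtain ⟨hi, hj, hs⟩ := h; subst hi; subst hj; simp [hs]
  · rfl

lemma pvCell_foldl_setCell (ps : List (Nat × Nat)) (v : List Char) :
    ∀ (g : List (List (List Char))) (i j : Nat),
      pvCell (ps.foldl (fun g p => pvSetCell g p.1 p.2 v) g) i j =
        if (i, j) ∈ ps ∧ (pvCell g i j).isSome then some v else pvCell g i j := by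
  induction ps with
  | nil => intro g i j; simp
  | cons p ps ih =>
    intro g i j
    simp only [List.foldl_cons]
    rw [ih, pvCell_setCell_isSome, pvCell_setCell]
    by_cases hs : (pvCell g i j).isSome
    · by_cases hp : i = p.1 ∧ j = p.2
      · obtain ⟨h1, h2⟩ := hp; subst h1; subst h2
        simp [hs]
      · have hne : (i, j) ≠ p := by rintro rfl; exact hp ⟨rfl, rfl⟩
        have hcond : ¬ (i = p.1 ∧ j = p.2 ∧ (pvCell g p.1 p.2).isSome = true) := by
          rintro ⟨h1, h2, -⟩; exact hp ⟨h1, h2⟩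
        simp [hs, hcond, hne]
    · rw [if_neg (by rintro ⟨-, h3⟩; exact hs h3),
          if_neg (by rintro ⟨h1, h2, h3⟩; subst h1; subst h2; exact hs h3),
          if_neg (by rintro ⟨-, h3⟩; exact hs h3)]

lemma pvShape_setCell (g : List (List (List Char))) (a b : Nat) (v : List Char) :
    (pvSetCell g a b v).map List.length = g.map List.length := by
  unfold pvSetCell
  by_cases ha : a < g.length
  · rw [List.map_set]
    have hlen : ((g.getD a []).set b v).length = g[a].length := by
      simp [List.getD, List.getElem?_eq_getElem ha]
    rw [hlen]
    apply List.ext_getElem (by simp)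
    intro k hk hk'
    by_cases hak : a = k
    · subst hak; simp [List.length_map] at hk ⊢
    · simp [hak]
  · rw [List.set_eq_of_length_le (by omega)]

lemma pvShape_foldl_setCell (ps : List (Nat × Nat)) (v : List Char) :
    ∀ (g : List (List (List Char))),
      (ps.foldl (fun g p => pvSetCell g p.1 p.2 v) g).map List.length = g.map List.length := by
  induction ps with
  | nil => intro g; rfl
  | cons p ps ih => intro g; simp only [List.foldl_cons]; rw [ih, pvShape_setCell]

lemma pvEq_of_shape_cell (g h : List (List (List Char)))
    (hs : g.map List.length = h.map List.length)
    (hc : ∀ i j, pvCell g i j = pvCell h i j) : g = h := by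
  have hlen : g.length = h.length := by
    have := congrArg List.length hs; simpa using this
  apply List.ext_getElem hlen
  intro i hi hi'
  have hrow : g[i].length = h[i].length := by
    have := congrArg (fun l => l[i]?) hs
    simp [hi, hi'] at this
    exact this
  apply List.ext_getElem hrow
  intro j hj hj'
  have := hc i j
  simp [pvCell, hi, hi', hj, hj'] at this
  exact this

lemma pvCell_map (g : List (List (List Char))) (f : List Char → List Char) (i j : Nat) :
    pvCell (g.map (List.map f)) i j = (pvCell g i j).map f := by
  simp only [pvCell, List.getElem?_map]
  cases g[i]? with
  | none => rfl
  | some r => simp [List.getElem?_map]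


-- decimal-representation groundwork: str is injective on nonnegative ints
def pvVal (cs : List Char) : Nat := cs.foldl (fun a c => 10 * a + (c.toNat - 48)) 0

lemma pvDigitChar_val (n : Nat) (h : n < 10) : (Nat.digitChar n).toNat - 48 = n := by
  interval_cases n <;> decide

lemma pvToDigitsCore_append : ∀ (f n : Nat) (ds : List Char),
    Nat.toDigitsCore 10 f n ds = Nat.toDigitsCore 10 f n [] ++ ds := by
  intro f
  induction f with
  | zero => intro n ds; simp [Nat.toDigitsCore]
  | succ f ih =>
    intro n ds
    simp only [Nat.toDigitsCore]
    by_cases h : n / 10 = 0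
    · simp [h]
    · simp only [if_neg h]
      rw [ih (n / 10) ((n % 10).digitChar :: ds), ih (n / 10) [(n % 10).digitChar]]
      simp

lemma pvVal_toDigitsCore : ∀ (f n : Nat), n < 10 ^ f →
    pvVal (Nat.toDigitsCore 10 f n []) = n := by
  intro f
  induction f with
  | zero => intro n h; interval_cases n; simp [Nat.toDigitsCore, pvVal]
  | succ f ih =>
    intro n hn
    simp only [Nat.toDigitsCore]
    by_cases h : n / 10 = 0
    · simp only [if_pos h, pvVal, List.foldl_cons, List.foldl_nil]
      rw [pvDigitChar_val (n % 10) (by omega)]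
      omega
    · simp only [if_neg h]
      rw [pvToDigitsCore_append]
      have hv : pvVal (Nat.toDigitsCore 10 f (n / 10) [] ++ [(n % 10).digitChar])
          = 10 * pvVal (Nat.toDigitsCore 10 f (n / 10) []) + ((n % 10).digitChar.toNat - 48) := by
        simp [pvVal, List.foldl_append]
      rw [hv, ih (n / 10) (by rw [pow_succ] at hn; omega), pvDigitChar_val (n % 10) (by omega)]
      omega

lemma pvVal_toDigits (n : Nat) : pvVal (Nat.toDigits 10 n) = n := by
  unfold Nat.toDigits
  exact pvVal_toDigitsCore (n + 1) n (by
    calc n < 10 ^ n := Nat.lt_pow_self (by norm_num)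
    _ ≤ 10 ^ (n + 1) := Nat.pow_le_pow_right (by norm_num) (by omega))

lemma pvToChars_inj {m n : Int} (hm : 0 ≤ m) (hn : 0 ≤ n)
    (h : PySem.Int.toChars m = PySem.Int.toChars n) : m = n := by
  unfold PySem.Int.toChars at h
  rw [if_neg (by omega), if_neg (by omega)] at h
  have := congrArg pvVal h
  rw [pvVal_toDigits, pvVal_toDigits] at this
  omega

-- the seat-number range, its closed form, and the lookup dict
lemma pvNums_eq (spr : Int) :
    PySem.List.pyRange 1 (spr + 1) 1 = (List.range spr.toNat).map (fun k : Nat => ((k + 1 : Nat) : Int)) := by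
  rw [PySem.List.pyRange_of_pos 1 (spr + 1) (by omega)]
  have harg : (if (1 : Int) < spr + 1 then ((spr + 1 - 1 + 1 - 1) / 1).toNat else 0) = spr.toNat := by
    split_ifs with h
    · norm_num
    · omega
  rw [harg]
  exact List.map_congr_left (fun k _ => by push_cast; ring)

lemma pvSeatNo_get? (spr : Int) (s : List Char) (v : Int) :
    ((PySem.List.pyRange 1 (spr + 1) 1).foldl
      (fun d n => d.insert (PySem.Int.toChars n) (n - 1)) PySem.Dict.empty).get? s = some v
    ↔ ∃ n ∈ PySem.List.pyRange 1 (spr + 1) 1, PySem.Int.toChars n = s ∧ n - 1 = v := by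
  have hinj : (List.map PySem.Int.toChars (PySem.List.pyRange 1 (spr + 1) 1)).Nodup := by
    rw [pvNums_eq, List.map_map]
    refine List.nodup_range.map ?_
    intro a b hab
    have := pvToChars_inj (m := ((a + 1 : Nat) : Int)) (n := ((b + 1 : Nat) : Int))
      (by positivity) (by positivity) hab
    omega
  have hitems := PySem.Dict.items_foldl_insert_fresh (PySem.List.pyRange 1 (spr + 1) 1)
    PySem.Int.toChars (fun n => n - 1) PySem.Dict.empty
    (fun a _ => PySem.Dict.contains_empty (ν := Int) a) hinj
  have hkeys : ((PySem.List.pyRange 1 (spr + 1) 1).foldl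
      (fun d n => d.insert (PySem.Int.toChars n) (n - 1)) PySem.Dict.empty).keys.Nodup := by
    simp only [PySem.Dict.keys, hitems]
    simpa [List.map_map, Function.comp_def] using hinj
  rw [PySem.Dict.get?_eq_some_iff_mem_items _ _ _ hkeys, hitems]
  simp [show (PySem.Dict.empty : PySem.Dict (List Char) Int).items = [] from rfl]

-- the cell a (blocked-string, (row, index)) pair marks, if any
def pvPosOf (spr : Int) (x : List Char × (List Char × Nat)) : Option (Nat × Nat) :=
  if PySem.Chars.startswith x.1 x.2.1 then
    match ((PySem.List.pyRange 1 (spr + 1) 1).foldl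
        (fun d n => d.insert (PySem.Int.toChars n) (n - 1)) PySem.Dict.empty).get?
        (x.1.drop x.2.1.length) with
    | some j => some (x.2.2, j.toNat)
    | none => none
  else none

-- a fold whose step marks an optional cell is a fold over the decoded positions
lemma pvFoldl_posOf_eq_filterMap {σ : Type} (xs : List σ) (posOf : σ → Option (Nat × Nat)) (v : List Char) :
    ∀ g : List (List (List Char)),
      xs.foldl (fun g x =>
        match posOf x with
        | some p => pvSetCell g p.1 p.2 v
        | none => g) g
      = (xs.filterMap posOf).foldl (fun g p => pvSetCell g p.1 p.2 v) g := by
  induction xs with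
  | nil => intro g; rfl
  | cons x xs ih =>
    intro g
    simp only [List.foldl_cons, List.filterMap_cons]
    cases posOf x with
    | none => exact ih g
    | some p => simp only [List.foldl_cons]; exact ih _

-- the grid's cell (i, j) is row i's label followed by str(j+1)
lemma pvCell_grid (row_labels : List String) (spr : Int) (i j : Nat) (t : List Char) :
    pvCell (row_labels.map (fun row =>
        (PySem.List.pyRange 1 (spr + 1) 1).map (fun n => row.toList ++ PySem.Int.toChars n))) i j = some t
    ↔ ∃ row, row_labels[i]? = some row ∧ j < spr.toNat ∧
        t = row.toList ++ PySem.Int.toChars ((j + 1 : Nat) : Int) := by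
  unfold pvCell
  rw [List.getElem?_map]
  cases hrow : row_labels[i]? with
  | none => simp
  | some row =>
    simp only [Option.map_some, Option.bind_some, Option.some.injEq]
    rw [pvNums_eq, List.map_map, List.getElem?_map]
    by_cases hj : j < spr.toNat
    · rw [List.getElem?_eq_getElem (by simpa using hj)]
      simp [hj, eq_comm]
    · rw [List.getElem?_eq_none (by simpa using hj)]
      simp [hj]

-- decoding succeeds exactly on the cells whose token equals the blocked string
lemma pvPosOf_eq_some_iff (row_labels : List String) (spr : Int) (b : List Char)
    (r : List Char) (i' i j : Nat) (hr : (row_labels.map String.toList)[i']? = some r) :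
    pvPosOf spr (b, (r, i')) = some (i, j) ↔
      (i' = i ∧ pvCell (row_labels.map (fun row =>
        (PySem.List.pyRange 1 (spr + 1) 1).map (fun n => row.toList ++ PySem.Int.toChars n))) i j = some b) := by
  rw [List.getElem?_map] at hr
  cases hrowl : row_labels[i']? with
  | none => rw [hrowl] at hr; simp at hr
  | some row =>
  rw [hrowl] at hr
  simp only [Option.map_some, Option.some.injEq] at hr
  constructor
  · intro h
    unfold pvPosOf at h
    by_cases hsw : PySem.Chars.startswith b r = true
    · rw [if_pos hsw] at h
      cases hget : ((PySem.List.pyRange 1 (spr + 1) 1).foldl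
          (fun d n => d.insert (PySem.Int.toChars n) (n - 1)) PySem.Dict.empty).get?
          (b.drop r.length) with
      | none => rw [hget] at h; simp at h
      | some jv =>
        rw [hget] at h
        simp only [Option.some.injEq, Prod.mk.injEq] at h
        obtain ⟨hi, hj⟩ := h
        obtain ⟨n, hn_mem, hn_chars, hn_val⟩ := (pvSeatNo_get? spr _ jv).mp hget
        obtain ⟨h1n, hnspr⟩ := PySem.List.mem_pyRange_one.mp hn_mem
        have hjn : n = ((j + 1 : Nat) : Int) := by
          have : (0 : Int) ≤ jv := by omega
          have : (jv.toNat : Int) = jv := Int.toNat_of_nonneg this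
          omega
        obtain ⟨s, hbs⟩ := (PySem.Chars.startswith_iff b r).mp hsw
        have hdrop : b.drop r.length = s := by rw [← hbs, List.drop_left]
        refine ⟨hi, (pvCell_grid ..).mpr ⟨row, by rw [← hi, hrowl], by omega, ?_⟩⟩
        rw [hdrop] at hn_chars
        rw [← hbs, hr, ← hjn, ← hn_chars]
    · rw [if_neg hsw] at h; simp at h
  · rintro ⟨hi, hcell⟩
    obtain ⟨row', hrow', hjlt, ht⟩ := (pvCell_grid ..).mp hcell
    rw [← hi, hrowl] at hrow'
    simp only [Option.some.injEq] at hrow'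
    subst hrow'
    unfold pvPosOf
    have hsw : PySem.Chars.startswith b r = true := by
      rw [PySem.Chars.startswith_iff, ht, hr]
      exact List.prefix_append ..
    rw [if_pos hsw]
    have hdrop : b.drop r.length = PySem.Int.toChars ((j + 1 : Nat) : Int) := by
      rw [ht, hr, List.drop_left]
    have hget : ((PySem.List.pyRange 1 (spr + 1) 1).foldl
        (fun d n => d.insert (PySem.Int.toChars n) (n - 1)) PySem.Dict.empty).get?
        (b.drop r.length) = some ((j : Int) + 1 - 1) := by
      rw [pvSeatNo_get?]
      refine ⟨((j + 1 : Nat) : Int), PySem.List.mem_pyRange_one.mpr ⟨by omega, by omega⟩, hdrop.symm, by push_cast; ring⟩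
    rw [hget]
    simp only [Option.some.injEq, Prod.mk.injEq]
    exact ⟨hi, by omega⟩

-- marking the decoded blocked cells IS the pointwise "if blocked then X" map over the grid
lemma pvMarked_eq (row_labels : List String) (spr : Int) (blockedL : List (List Char)) :
    (blockedL.foldl
      (fun g b => (row_labels.map String.toList).zipIdx.foldl
        (fun g p =>
          if PySem.Chars.startswith b p.1 then
            match ((PySem.List.pyRange 1 (spr + 1) 1).foldl
                (fun d n => d.insert (PySem.Int.toChars n) (n - 1)) PySem.Dict.empty).get?
                (b.drop p.1.length) with
            | some j => pvSetCell g p.2 j.toNat ['X']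
            | none => g
          else g) g)
      (row_labels.map (fun row =>
        (PySem.List.pyRange 1 (spr + 1) 1).map (fun n => row.toList ++ PySem.Int.toChars n))))
    = (row_labels.map (fun row =>
        (PySem.List.pyRange 1 (spr + 1) 1).map (fun n => row.toList ++ PySem.Int.toChars n))).map
        (List.map (fun t => if t ∈ blockedL then ['X'] else t)) := by
  have hstep : ∀ (b : List Char) (g : List (List (List Char))) (p : List Char × Nat),
      (if PySem.Chars.startswith b p.1 then
        match ((PySem.List.pyRange 1 (spr + 1) 1).foldl
            (fun d n => d.insert (PySem.Int.toChars n) (n - 1)) PySem.Dict.empty).get?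
            (b.drop p.1.length) with
        | some j => pvSetCell g p.2 j.toNat ['X']
        | none => g
      else g)
      = (match pvPosOf spr (b, p) with
        | some q => pvSetCell g q.1 q.2 ['X']
        | none => g) := by
    intro b g p
    unfold pvPosOf
    by_cases hsw : PySem.Chars.startswith b p.1 = true
    · rw [if_pos hsw, if_pos hsw]
      cases ((PySem.List.pyRange 1 (spr + 1) 1).foldl
          (fun d n => d.insert (PySem.Int.toChars n) (n - 1)) PySem.Dict.empty).get?
          (b.drop p.1.length) with
      | none => rfl
      | some j => rfl
    · rw [if_neg hsw, if_neg hsw]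
  have hnested : (blockedL.foldl
      (fun g b => (row_labels.map String.toList).zipIdx.foldl
        (fun g p =>
          if PySem.Chars.startswith b p.1 then
            match ((PySem.List.pyRange 1 (spr + 1) 1).foldl
                (fun d n => d.insert (PySem.Int.toChars n) (n - 1)) PySem.Dict.empty).get?
                (b.drop p.1.length) with
            | some j => pvSetCell g p.2 j.toNat ['X']
            | none => g
          else g) g)
      (row_labels.map (fun row =>
        (PySem.List.pyRange 1 (spr + 1) 1).map (fun n => row.toList ++ PySem.Int.toChars n))))
      = ((blockedL.flatMap (fun b => (row_labels.map String.toList).zipIdx.map (fun p => (b, p)))).filterMap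
          (pvPosOf spr)).foldl (fun g q => pvSetCell g q.1 q.2 ['X'])
        (row_labels.map (fun row =>
          (PySem.List.pyRange 1 (spr + 1) 1).map (fun n => row.toList ++ PySem.Int.toChars n))) := by
    rw [← pvFoldl_posOf_eq_filterMap, List.foldl_flatMap]
    refine PySem.List.foldl_congr_mem _ _ _ _ (fun g b _ => ?_)
    rw [List.foldl_map]
    exact PySem.List.foldl_congr_mem _ _ _ _ (fun g p _ => hstep b g p)
  rw [hnested]
  apply pvEq_of_shape_cell
  · rw [pvShape_foldl_setCell]
    apply List.ext_getElem (by simp)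
    intro k hk hk'
    simp
  · intro i j
    rw [pvCell_foldl_setCell, pvCell_map]
    have hmem : ((i, j) ∈ (blockedL.flatMap (fun b =>
        (row_labels.map String.toList).zipIdx.map (fun p => (b, p)))).filterMap (pvPosOf spr))
        ↔ ∃ b ∈ blockedL, pvCell (row_labels.map (fun row =>
            (PySem.List.pyRange 1 (spr + 1) 1).map (fun n => row.toList ++ PySem.Int.toChars n))) i j = some b := by
      simp only [List.mem_filterMap, List.mem_flatMap, List.mem_map]
      constructor
      · rintro ⟨x, ⟨b, hb, p, hp, rfl⟩, hpos⟩
        have hr : (row_labels.map String.toList)[p.2]? = some p.1 :=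
          List.mk_mem_zipIdx_iff_getElem?.mp (by rwa [← Prod.mk.eta (p := p)] at hp)
        obtain ⟨-, hcell⟩ := (pvPosOf_eq_some_iff row_labels spr b p.1 p.2 i j hr).mp hpos
        exact ⟨b, hb, hcell⟩
      · rintro ⟨b, hb, hcell⟩
        have hi : i < (row_labels.map String.toList).length := by
          unfold pvCell at hcell
          cases hgi : (row_labels.map (fun row =>
              (PySem.List.pyRange 1 (spr + 1) 1).map (fun n => row.toList ++ PySem.Int.toChars n)))[i]? with
          | none => rw [hgi] at hcell; simp at hcell
          | some _ =>
            have := List.getElem?_eq_some_iff.mp hgi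
            simp only [List.length_map] at this ⊢
            exact this.1
        have hr : (row_labels.map String.toList)[i]? = some ((row_labels.map String.toList)[i]) :=
          List.getElem?_eq_getElem hi
        refine ⟨(b, ((row_labels.map String.toList)[i], i)), ⟨b, hb,
          ((row_labels.map String.toList)[i], i), List.mk_mem_zipIdx_iff_getElem?.mpr hr, rfl⟩, ?_⟩
        exact (pvPosOf_eq_some_iff row_labels spr b _ i i j hr).mpr ⟨rfl, hcell⟩
    cases hcell : pvCell (row_labels.map (fun row =>
        (PySem.List.pyRange 1 (spr + 1) 1).map (fun n => row.toList ++ PySem.Int.toChars n))) i j with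
    | none =>
      rw [if_neg (by simp)]
      simp
    | some t =>
      by_cases hbt : t ∈ blockedL
      · rw [if_pos ⟨hmem.mpr ⟨t, hbt, hcell⟩, by simp⟩]
        simp [hbt]
      · rw [if_neg ?_]
        · simp [hbt]
        · rintro ⟨h1, -⟩
          obtain ⟨b, hb, hc⟩ := hmem.mp h1
          rw [hcell] at hc
          exact hbt (by cases hc; exact hb)

-- A's inner loop (token plus a space before every non-final seat) is join-with-space over the token list.
lemma inner_fold_join (tok : Int → List Char) (n : Int) :
    ∀ (a : Int) (acc : List Char),
      (PySem.List.pyRange a (n + 1) 1).foldl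
        (fun (acc : List Char) (seat : Int) =>
          let acc := acc ++ tok seat
          if seat < n then acc ++ [' '] else acc) acc
      = acc ++ PySem.Chars.join [' '] ((PySem.List.pyRange a (n + 1) 1).map tok) := by
  intro a acc
  by_cases h : n + 1 ≤ a
  · rw [PySem.List.pyRange_one_eq_nil h]
    simp [PySem.Chars.join, List.intercalate]
  · rw [not_le] at h
    have hlt : a < n + 1 := h
    rw [PySem.List.pyRange_one_cons hlt]
    by_cases hlast : a < n
    · have hrec := inner_fold_join tok n (a + 1) (acc ++ tok a ++ [' '])
      have hne : PySem.List.pyRange (a + 1) (n + 1) 1 ≠ [] := by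
        rw [PySem.List.pyRange_one_cons (by omega)]; simp
      simp only [List.foldl_cons, if_pos hlast]
      rw [hrec]
      obtain ⟨b, rest, hbr⟩ : ∃ b rest, PySem.List.pyRange (a + 1) (n + 1) 1 = b :: rest := by
        cases hc : PySem.List.pyRange (a + 1) (n + 1) 1 with
        | nil => exact absurd hc hne
        | cons b rest => exact ⟨b, rest, rfl⟩
      rw [hbr]
      simp [PySem.Chars.join_cons_cons, List.append_assoc]
    · have ha : a = n := by omega
      subst ha
      rw [PySem.List.pyRange_one_eq_nil (by omega : a + 1 ≤ a + 1)]
      simp [PySem.Chars.join, List.intercalate]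
termination_by a => (n + 1 - a).toNat
decreasing_by omega

-- A's outer loop (row string plus a newline before every non-final row) is join-with-newline over the row strings.
lemma outer_fold_join (g : String → List Char) (total : Int) :
    ∀ (rows : List String) (c : Int) (acc : List Char), c + rows.length = total →
      (rows.foldl
        (fun (st : List Char × Int) (row : String) =>
          let count := st.2 + 1
          let afterRow := st.1 ++ g row
          (if count < total then afterRow ++ ['\n'] else afterRow, count))
        (acc, c)).1
      = acc ++ PySem.Chars.join ['\n'] (rows.map g) := by
  intro rows
  induction rows with
  | nil => intro c acc h; simp [PySem.Chars.join, List.intercalate]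
  | cons r rest ih =>
    intro c acc h
    simp only [List.foldl_cons, List.map_cons]
    cases rest with
    | nil =>
      have hc : ¬ c + 1 < total := by simp at h; omega
      simp [hc, PySem.Chars.join, List.intercalate]
    | cons r2 rest2 =>
      have hc : c + 1 < total := by simp at h; omega
      have := ih (c + 1) (acc ++ g r ++ ['\n']) (by simp at h ⊢; omega)
      simp only [if_pos hc]
      rw [this]
      simp [PySem.Chars.join_cons_cons, List.append_assoc]

-- B's let-chain, written out (definitional equality; lets pvMarked_eq rewrite)
lemma alt_unfolded (row_labels : List String) (seats_per_row : Int) (blocked_seats : List String) :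
    build_seat_map_alt row_labels seats_per_row blocked_seats =
      String.ofList (PySem.Chars.join ['\n']
        ((((blocked_seats.map String.toList).foldl
          (fun g b => (row_labels.map String.toList).zipIdx.foldl
            (fun g p =>
              if PySem.Chars.startswith b p.1 then
                match ((PySem.List.pyRange 1 (seats_per_row + 1) 1).foldl
                    (fun d n => d.insert (PySem.Int.toChars n) (n - 1)) PySem.Dict.empty).get?
                    (b.drop p.1.length) with
                | some j => pvSetCell g p.2 j.toNat ['X']
                | none => g
              else g) g)
          (row_labels.map (fun row =>
            (PySem.List.pyRange 1 (seats_per_row + 1) 1).map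
              (fun n => row.toList ++ PySem.Int.toChars n))))).map (PySem.Chars.join [' ']))) := rfl

-- ===== VERDICT (by name: the statement is the Claim_ definition above) =====
theorem build_seat_map_spec : Claim_equal_build_seat_map := by
  intro row_labels seats_per_row blocked_seats _
  unfold Spec_build_seat_map build_seat_map
  rw [alt_unfolded, pvMarked_eq]
  congr 1
  have hinner :
      (fun (st : List Char × Int) (row : String) =>
        let count := st.2 + 1
        let afterRow :=
          (PySem.List.pyRange 1 (seats_per_row + 1) 1).foldl
            (fun (acc : List Char) (seat : Int) =>
              let temp_seat := row.toList ++ PySem.Int.toChars seat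
              let acc := acc ++ (if temp_seat ∈ blocked_seats.map String.toList then ['X'] else temp_seat)
              if seat < seats_per_row then acc ++ [' '] else acc)
            st.1
        (if count < (row_labels.length : Int) then afterRow ++ ['\n'] else afterRow, count))
      = (fun (st : List Char × Int) (row : String) =>
        let count := st.2 + 1
        let afterRow := st.1 ++
          PySem.Chars.join [' ']
            ((PySem.List.pyRange 1 (seats_per_row + 1) 1).map (fun seat =>
              let temp := row.toList ++ PySem.Int.toChars seat
              if temp ∈ blocked_seats.map String.toList then ['X'] else temp))
        (if count < (row_labels.length : Int) then afterRow ++ ['\n'] else afterRow, count)) := by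
    funext st row
    simp only
    rw [inner_fold_join (fun seat =>
      let temp := row.toList ++ PySem.Int.toChars seat
      if temp ∈ blocked_seats.map String.toList then ['X'] else temp) seats_per_row 1 st.1]
  rw [hinner]
  rw [outer_fold_join _ (row_labels.length : Int) row_labels 0 [] (by simp)]
  simp [List.map_map, Function.comp_def]
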